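-- pv_equiv track=rewrite | github.com/ratschlab/gromics | gromics/viz/gwas.py | _get_chrm_offsets
-- ===== SOURCE A (Python) =====
-- def _get_chrm_offsets(chr_lens):
--
--     offsets = dict()
--     s_keys = sorted(chr_lens)
--     for i, k in enumerate(s_keys):
--         if i == 0:
--             offsets[k] = 0
--         else:
--             offsets[k] = offsets[s_keys[i-1]] + chr_lens[s_keys[i-1]]
--     return offsets
-- ===== SOURCE B (Python) =====
-- def _get_chrm_offsets(chr_lens):
--     # Comparison-based: each key's offset is the total length of all strictly
--     # smaller keys, found by a direct scan over the items -- no running sum,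
--     # no prefix accumulation, no back-reference to previously computed offsets.
--     return {k: sum(v for j, v in chr_lens.items() if j < k)
--             for k in sorted(chr_lens)}
-- ===== Notes on version B (the rewrite author's own statement) =====
-- stated objective: alternative
-- what changed: B drops A's sequential prefix accumulation (offsets[k] built from the previous key's offset) and instead computes each key's offset independently as the sum of the lengths of all strictly smaller keys via a direct scan of the items, trading O(n log n) for a simpler order-independent quadratic definition.
import Mathlib
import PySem

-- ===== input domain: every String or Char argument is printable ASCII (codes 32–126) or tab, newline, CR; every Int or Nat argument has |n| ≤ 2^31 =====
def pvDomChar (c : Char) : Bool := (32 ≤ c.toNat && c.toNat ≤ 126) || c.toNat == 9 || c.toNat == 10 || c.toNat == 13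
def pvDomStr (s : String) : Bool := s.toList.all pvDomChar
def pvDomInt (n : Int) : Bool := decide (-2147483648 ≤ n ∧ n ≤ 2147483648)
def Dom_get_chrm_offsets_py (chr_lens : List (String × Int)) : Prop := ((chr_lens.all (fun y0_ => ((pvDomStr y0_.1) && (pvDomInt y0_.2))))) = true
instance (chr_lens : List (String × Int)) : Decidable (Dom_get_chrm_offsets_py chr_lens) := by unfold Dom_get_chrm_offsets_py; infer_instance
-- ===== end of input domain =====

-- B replaces A's sequential prefix accumulation (each offset built from the previous key's
-- offset) by an independent per-key scan: offset(k) = sum of lengths of all strictly smaller keys.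

-- ===== PORT A =====
def get_chrm_offsets_py (chr_lens : List (String × Int)) : List (String × Int) :=
  let d := PySem.Dict.ofList chr_lens
  let s_keys := PySem.List.sorted d.keys (fun k => k)
  let offsets := (PySem.List.enumerate s_keys).foldl
    (fun (offsets : PySem.Dict String Int) ik =>
      if ik.1 == 0 then
        offsets.insert ik.2 0
      else
        -- index ik.1 - 1 is in range and both lookups hit present keys, so the defaults are never used
        let prev := (PySem.List.pyGet? s_keys (ik.1 - 1)).getD ""
        offsets.insert ik.2 (offsets.getD prev 0 + d.getD prev 0))
    PySem.Dict.empty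
  offsets.items

-- ===== PORT B =====
def get_chrm_offsets_py_alt (chr_lens : List (String × Int)) : List (String × Int) :=
  let d := PySem.Dict.ofList chr_lens
  let s_keys := PySem.List.sorted d.keys (fun k => k)
  (s_keys.foldl
    (fun (off : PySem.Dict String Int) k =>
      off.insert k (d.items.foldl (fun s jv => if jv.1 < k then s + jv.2 else s) 0))
    PySem.Dict.empty).items

-- ===== PRECONDITION & SPEC =====
def Spec_get_chrm_offsets_py (chr_lens : List (String × Int)) (out : List (String × Int)) : Prop := out = get_chrm_offsets_py_alt chr_lens
instance (chr_lens : List (String × Int)) (out : List (String × Int)) : Decidable (Spec_get_chrm_offsets_py chr_lens out) := by unfold Spec_get_chrm_offsets_py; infer_instance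

-- ===== CLAIM (what is proved, stated in full; the proofs are below) =====
def Claim_equal_get_chrm_offsets_py : Prop := ∀ (chr_lens : List (String × Int)), Dom_get_chrm_offsets_py chr_lens → Spec_get_chrm_offsets_py chr_lens (get_chrm_offsets_py chr_lens)

-- ===== LEMMAS AND PROOFS =====

-- the shifted prefix-sum table: pvOffs t [v1, ..., vn] = [t, t+v1, ..., t+v1+...+v(n-1)]
def pvOffs : Int → List Int → List Int
  | _, [] => []
  | t, v :: vs => t :: pvOffs (t + v) vs

theorem pvOffs_length (t : Int) (vs : List Int) : (pvOffs t vs).length = vs.length := by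
  induction vs generalizing t with
  | nil => rfl
  | cons v vs ih => simp [pvOffs, ih]

theorem pvOffs_append (t : Int) (vs : List Int) (a : Int) :
    pvOffs t (vs ++ [a]) = pvOffs t vs ++ [t + vs.sum] := by
  induction vs generalizing t with
  | nil => simp [pvOffs]
  | cons v vs ih => simp [pvOffs, ih]; ring

theorem pvZip_snoc (v : String → Int) (l : List String) (x : String) :
    (l ++ [x]).zip (pvOffs 0 ((l ++ [x]).map v))
      = l.zip (pvOffs 0 (l.map v)) ++ [(x, (l.map v).sum)] := by
  simp only [List.map_append, List.map_cons, List.map_nil, pvOffs_append]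
  rw [List.zip_append (by simp [pvOffs_length])]
  simp

theorem pvKeys_zip (v : String → Int) (l : List String) :
    (PySem.Dict.mk (l.zip (pvOffs 0 (l.map v)))).keys = l := by
  simp only [PySem.Dict.keys_mk]
  rw [List.map_fst_zip]
  simp [pvOffs_length]

theorem pvGetD_last (v : String → Int) (l : List String) (x : String)
    (hnd : (l ++ [x]).Nodup) :
    (PySem.Dict.mk ((l ++ [x]).zip (pvOffs 0 ((l ++ [x]).map v)))).getD x 0
      = (l.map v).sum := by
  have hmem : (x, (l.map v).sum) ∈ (l ++ [x]).zip (pvOffs 0 ((l ++ [x]).map v)) := by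
    rw [pvZip_snoc]; simp
  exact PySem.Dict.getD_of_mem_items
    (PySem.Dict.mk ((l ++ [x]).zip (pvOffs 0 ((l ++ [x]).map v)))) hmem
    (by rw [pvKeys_zip]; exact hnd) 0

-- A's enumerate loop, generalized over a processed prefix
theorem pvA_loop (v : String → Int) :
    ∀ (rest pref : List String), (pref ++ rest).Nodup →
    (PySem.List.enumerate rest (pref.length : Int)).foldl
      (fun (offsets : PySem.Dict String Int) ik =>
        if ik.1 == 0 then
          offsets.insert ik.2 0
        else
          let prev := (PySem.List.pyGet? (pref ++ rest) (ik.1 - 1)).getD ""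
          offsets.insert ik.2 (offsets.getD prev 0 + v prev))
      (PySem.Dict.mk (pref.zip (pvOffs 0 (pref.map v)))) =
    PySem.Dict.mk ((pref ++ rest).zip (pvOffs 0 ((pref ++ rest).map v))) := by
  intro rest
  induction rest with
  | nil => intro pref _; simp [PySem.List.enumerate_nil]
  | cons k rest' ih =>
    intro pref hnd
    rw [PySem.List.enumerate_cons, List.foldl_cons]
    have hknotin : k ∉ pref := by
      intro hk
      exact (List.disjoint_of_nodup_append hnd) hk (by simp)
    have hnc : (PySem.Dict.mk (pref.zip (pvOffs 0 (pref.map v)))).contains k = false := by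
      rw [PySem.Dict.contains_eq_decide_mem_keys, pvKeys_zip]
      simpa using hknotin
    have hstep :
        (if ((pref.length : Int) == 0) then
          (PySem.Dict.mk (pref.zip (pvOffs 0 (pref.map v)))).insert k 0
        else
          let prev := (PySem.List.pyGet? (pref ++ k :: rest') ((pref.length : Int) - 1)).getD ""
          (PySem.Dict.mk (pref.zip (pvOffs 0 (pref.map v)))).insert k
            ((PySem.Dict.mk (pref.zip (pvOffs 0 (pref.map v)))).getD prev 0 + v prev))
        = PySem.Dict.mk ((pref ++ [k]).zip (pvOffs 0 ((pref ++ [k]).map v))) := by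
      rcases List.eq_nil_or_concat pref with hp | ⟨l, x, hp⟩
      · subst hp
        apply PySem.Dict.ext
        rw [if_pos (by simp)]
        rw [PySem.Dict.items_insert_of_not_contains _ _ hnc]
        simp [pvOffs]
      · rw [List.concat_eq_append] at hp
        subst hp
        rw [if_neg (by simp; omega)]
        have hidx : (((l ++ [x]).length : Nat) : Int) - 1 = ((l.length : Nat) : Int) := by
          simp
        have hlist : (l ++ [x]) ++ k :: rest' = l ++ x :: (k :: rest') := by simp
        have hprev : (PySem.List.pyGet? ((l ++ [x]) ++ k :: rest') (((l ++ [x]).length : Int) - 1)).getD ""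
            = x := by
          rw [hidx, hlist, PySem.List.pyGet?_append_length]
          rfl
        simp only [hprev]
        rw [pvGetD_last v l x (List.Nodup.of_append_left hnd)]
        apply PySem.Dict.ext
        rw [PySem.Dict.items_insert_of_not_contains _ _ hnc]
        show (l ++ [x]).zip (pvOffs 0 ((l ++ [x]).map v)) ++ _ = _
        rw [pvZip_snoc v (l ++ [x]) k]
        simp
    rw [hstep]
    have hstart : (pref.length : Int) + 1 = (((pref ++ [k]).length : Nat) : Int) := by
      simp
    have hlist2 : pref ++ k :: rest' = (pref ++ [k]) ++ rest' := by simp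
    rw [hstart, hlist2]
    exact ih (pref ++ [k]) (by simpa using hnd)

-- B's inner scan is the sum over items with strictly smaller key
theorem pvSumIf (k : String) :
    ∀ (items : List (String × Int)) (init : Int),
    items.foldl (fun s jv => if jv.1 < k then s + jv.2 else s) init
      = init + ((items.filter (fun jv => decide (jv.1 < k))).map Prod.snd).sum := by
  intro items
  induction items with
  | nil => intro init; simp
  | cons jv rest ih =>
    intro init
    rw [List.foldl_cons]
    by_cases h : jv.1 < k
    · rw [if_pos h, List.filter_cons_of_pos (by simpa using h), List.map_cons, List.sum_cons, ih]
      ring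
    · rw [if_neg h, List.filter_cons_of_neg (by simpa using h), ih]

-- a dict's items are (up to order) its keys paired with their looked-up values
theorem pvPermItems (d : PySem.Dict String Int) (hnd : d.keys.Nodup)
    (s_keys : List String) (hp : s_keys.Perm d.keys) :
    (s_keys.map (fun j => (j, d.getD j 0))).Perm d.items := by
  have h2 : d.keys.map (fun j => (j, d.getD j 0)) = d.items := by
    show (d.items.map Prod.fst).map (fun j => (j, d.getD j 0)) = d.items
    rw [List.map_map]
    conv_rhs => rw [← List.map_id d.items]
    apply List.map_congr_left
    intro jv hjv
    have := PySem.Dict.getD_of_mem_items d (k := jv.1) (v := jv.2) (by simpa using hjv) hnd 0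
    simp [Function.comp, this]
  exact h2 ▸ (hp.map _)

-- zip with the prefix table = map with the smaller-keys sum, on a strictly sorted list
theorem pvZipMap (v : String → Int) :
    ∀ (l : List String), l.Pairwise (· < ·) → ∀ t : Int,
    l.zip (pvOffs t (l.map v))
      = l.map (fun k => (k, t + ((l.filter (fun j => decide (j < k))).map v).sum)) := by
  intro l
  induction l with
  | nil => intro _ _; simp
  | cons a rest ih =>
    intro hpw t
    have ha : ∀ b ∈ rest, a < b := fun b hb => (List.pairwise_cons.mp hpw).1 b hb
    have hrest := (List.pairwise_cons.mp hpw).2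
    have hhead : (a :: rest).filter (fun j => decide (j < a)) = [] := by
      rw [List.filter_eq_nil_iff]
      intro x hx
      simp only [decide_eq_true_eq]
      rcases List.mem_cons.mp hx with h | h
      · subst h; exact lt_irrefl x
      · exact not_lt_of_gt (ha x h)
    simp only [List.map_cons, pvOffs, List.zip_cons_cons, hhead]
    rw [ih hrest (t + v a)]
    congr 1
    · simp
    · apply List.map_congr_left
      intro k hk
      have hfx : (a :: rest).filter (fun j => decide (j < k)) = a :: rest.filter (fun j => decide (j < k)) := by
        rw [List.filter_cons]
        simp [ha k hk]
      simp only [hfx, List.map_cons, List.sum_cons, add_assoc]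

-- ===== VERDICT (by name: the statement is the Claim_ definition above) =====
theorem get_chrm_offsets_py_spec : Claim_equal_get_chrm_offsets_py := by
  intro chr_lens _
  unfold Spec_get_chrm_offsets_py get_chrm_offsets_py get_chrm_offsets_py_alt
  simp only []
  set d := PySem.Dict.ofList chr_lens with hd
  set s_keys := PySem.List.sorted d.keys (fun k => k) with hs
  set v : String → Int := fun k => d.getD k 0 with hv
  have hkndK : d.keys.Nodup := PySem.Dict.nodup_keys_ofList chr_lens
  have hperm : s_keys.Perm d.keys := PySem.List.sorted_perm d.keys (fun k => k) false
  have hknd : s_keys.Nodup := hperm.nodup_iff.mpr hkndK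
  have hpw : s_keys.Pairwise (· < ·) := by
    have hle : s_keys.Pairwise (fun a b => a ≤ b) := PySem.List.sorted_pairwise d.keys (fun k => k)
    have := hle.and hknd
    exact this.imp (fun h => lt_of_le_of_ne h.1 h.2)
  -- A's loop builds the zip with the prefix table
  have hA := pvA_loop v s_keys [] (by simpa using hknd)
  simp only [List.nil_append, List.length_nil, Nat.cast_zero, List.map_nil,
    List.zip_nil_left] at hA
  rw [show (PySem.Dict.empty : PySem.Dict String Int) = PySem.Dict.mk [] from rfl, hA]
  -- B's loop inserts fresh distinct keys, so items = map
  have hB := PySem.Dict.items_foldl_insert_fresh s_keys (fun k => k)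
    (fun k => d.items.foldl (fun s jv => if jv.1 < k then s + jv.2 else s) 0)
    PySem.Dict.empty (fun a _ => rfl) (by simpa using hknd)
  have hB' : (s_keys.foldl
      (fun (off : PySem.Dict String Int) k =>
        off.insert k (d.items.foldl (fun s jv => if jv.1 < k then s + jv.2 else s) 0))
      (PySem.Dict.mk [])).items
      = s_keys.map (fun k => (k, d.items.foldl (fun s jv => if jv.1 < k then s + jv.2 else s) 0)) := by
    simpa using hB
  rw [hB']
  -- rewrite B's per-key value as the smaller-keys sum over s_keys
  have hval : ∀ k, d.items.foldl (fun s jv => if jv.1 < k then s + jv.2 else s) 0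
      = ((s_keys.filter (fun j => decide (j < k))).map v).sum := by
    intro k
    rw [pvSumIf k d.items 0, zero_add]
    have hpi := (pvPermItems d hkndK s_keys hperm).symm
    have h1 := ((hpi.filter (fun jv => decide (jv.1 < k))).map Prod.snd).sum_eq
    rw [h1]
    rw [List.filter_map, List.map_map]
    rfl
  calc s_keys.zip (pvOffs 0 (s_keys.map v))
      = s_keys.map (fun k => (k, (0 : Int) + ((s_keys.filter (fun j => decide (j < k))).map v).sum)) :=
        pvZipMap v s_keys hpw 0
    _ = _ := by
        apply List.map_congr_left
        intro k _
        rw [hval k, zero_add]
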